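-- pv_equiv track=rewrite | github.com/pasongsj/capstone_project | flask/app/cleaning/data_cleaning.py | recruit_count
-- ===== SOURCE A (Python) =====
-- fields = [80,81,82,83,84,85,86,87,88,89,90,91,92,95,97,98,99,100,101,181,104,153,128,184]
--
-- def recruit_count(data):#공고 비율
--     result = {}
--     for efield in fields:# 각 카테고리 별 확인
--         count = 0
--         for e_data in data:
--             if efield in e_data['task']:
--                 count = count + 1
--         result[efield] = count
--     return result
-- ===== SOURCE B (Python) =====
-- fields = [80,81,82,83,84,85,86,87,88,89,90,91,92,95,97,98,99,100,101,181,104,153,128,184]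
--
-- def recruit_count(data):
--     # Single pass over data with a pre-initialized count table, instead of
--     # rescanning all of data once per field.
--     result = {f: 0 for f in fields}
--     for e_data in data:
--         for t in set(e_data['task']):
--             if t in result:
--                 result[t] = result[t] + 1
--     return result
-- ===== Notes on version B (the rewrite author's own statement) =====
-- stated objective: faster
-- what changed: Replaces A's per-field rescans of the whole data list with a single pass over data that increments a pre-initialized count table keyed by the fields.
import Mathlib
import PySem

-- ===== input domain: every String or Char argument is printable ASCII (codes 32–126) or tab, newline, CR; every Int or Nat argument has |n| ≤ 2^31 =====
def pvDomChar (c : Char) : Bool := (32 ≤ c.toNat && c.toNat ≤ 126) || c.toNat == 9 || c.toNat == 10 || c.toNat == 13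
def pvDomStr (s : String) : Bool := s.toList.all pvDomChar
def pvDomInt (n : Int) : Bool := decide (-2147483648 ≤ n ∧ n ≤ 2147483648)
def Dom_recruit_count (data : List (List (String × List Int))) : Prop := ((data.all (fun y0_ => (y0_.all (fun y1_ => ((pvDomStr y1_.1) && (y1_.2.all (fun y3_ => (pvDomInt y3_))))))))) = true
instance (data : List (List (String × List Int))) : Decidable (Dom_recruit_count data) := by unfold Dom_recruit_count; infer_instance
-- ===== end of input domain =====

-- B changes the decomposition: one pass over data maintaining a running count table keyed by the
-- fields, instead of A's rescan of all data once per field.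

-- the module-level constant 'fields'
def pvFields : List Int := [80,81,82,83,84,85,86,87,88,89,90,91,92,95,97,98,99,100,101,181,104,153,128,184]

-- e_data['task'] (total form; Pre_ guarantees the key is present, so the default is never used)
def pvTaskOf (e : List (String × List Int)) : List Int := (PySem.Dict.mk e).getD "task" []

-- ===== PORT A =====
def recruit_count (data : List (List (String × List Int))) : List (Int × Int) :=
  (pvFields.foldl (fun result efield =>
      result.insert efield
        (data.foldl (fun count e_data =>
            if efield ∈ pvTaskOf e_data then count + 1 else count) (0 : Int)))
    PySem.Dict.empty).items

-- ===== PORT B =====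
def recruit_count_alt (data : List (List (String × List Int))) : List (Int × Int) :=
  (data.foldl (fun result e_data =>
      (PySem.Set.ofList (pvTaskOf e_data)).foldl (fun r t =>
          if r.contains t then r.modify t 0 (· + 1) else r) result)
    (pvFields.foldl (fun r f => r.insert f (0 : Int)) PySem.Dict.empty)).items

-- ===== PRECONDITION & SPEC =====
-- Pre_ excludes exactly the inputs where some item lacks the key 'task' (Python A raises KeyError there).
def Pre_recruit_count (data : List (List (String × List Int))) : Prop :=
  (data.all (fun e => e.any (fun p => p.1 == "task"))) = true
instance (data : List (List (String × List Int))) : Decidable (Pre_recruit_count data) := by unfold Pre_recruit_count; infer_instance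

def pvWitness_recruit_count : (List (List (String × List Int))) := [[("task", [80, 5])], [("task", [])]]

def Spec_recruit_count (data : List (List (String × List Int))) (out : List (Int × Int)) : Prop := out = recruit_count_alt data
instance (data : List (List (String × List Int))) (out : List (Int × Int)) : Decidable (Spec_recruit_count data out) := by unfold Spec_recruit_count; infer_instance

-- ===== CLAIM (what is proved, stated in full; the proofs are below) =====
def Claim_equal_recruit_count : Prop := ∀ (data : List (List (String × List Int))), Dom_recruit_count data → Pre_recruit_count data → Spec_recruit_count data (recruit_count data)

-- ===== LEMMAS AND PROOFS =====

-- A's inner count, in closed form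
def pvCnt (f : Int) (data : List (List (String × List Int))) : Int :=
  data.foldr (fun e acc => (if f ∈ pvTaskOf e then 1 else 0) + acc) 0

lemma pvCnt_foldl (f : Int) (data : List (List (String × List Int))) (c : Int) :
    data.foldl (fun count e => if f ∈ pvTaskOf e then count + 1 else count) c = c + pvCnt f data := by
  induction data generalizing c with
  | nil => simp [pvCnt]
  | cons e rest ih =>
    simp only [List.foldl_cons, pvCnt, List.foldr_cons] at *
    rw [ih]
    split_ifs with h <;> ring

-- B's inner loop over one item's deduplicated task list: keys preserved, each present key +1
lemma pvInner (s : List Int) (hs : s.Nodup) (d : PySem.Dict Int Int) :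
    (s.foldl (fun r t => if r.contains t then r.modify t 0 (· + 1) else r) d).keys = d.keys ∧
    ∀ f, (s.foldl (fun r t => if r.contains t then r.modify t 0 (· + 1) else r) d).getD f 0 =
      d.getD f 0 + (if f ∈ s ∧ f ∈ d.keys then 1 else 0) := by
  induction s generalizing d with
  | nil => simp
  | cons t rest ih =>
    have hnd := hs
    rw [List.nodup_cons] at hnd
    obtain ⟨htr, hrest⟩ := hnd
    simp only [List.foldl_cons]
    set d' := if d.contains t then d.modify t 0 (· + 1) else d with hd'
    have hkeys : d'.keys = d.keys := by
      rw [hd']; split_ifs with h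
      · rw [PySem.Dict.keys_modify, PySem.Dict.keys_insert_of_contains]
        first
        | exact (PySem.Dict.contains_iff_mem_keys d t).mpr h
        | exact h
      · rfl
    have hget : ∀ f, d'.getD f 0 = d.getD f 0 + (if f = t ∧ f ∈ d.keys then 1 else 0) := by
      intro f
      rw [hd']
      by_cases h : d.contains t = true
      · rw [if_pos h, PySem.Dict.getD_modify]
        have hk : t ∈ d.keys := (PySem.Dict.contains_iff_mem_keys d t).mp h
        by_cases hft : f = t
        · subst hft; simp [hk]
        · simp [hft]
      · rw [if_neg h]
        have hk : t ∉ d.keys := fun hm => h ((PySem.Dict.contains_iff_mem_keys d t).mpr hm)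
        by_cases hft : f = t
        · subst hft; simp [hk]
        · simp [hft]
    obtain ⟨ik, ig⟩ := ih hrest d'
    refine ⟨by rw [ik, hkeys], ?_⟩
    intro f
    rw [ig f, hget f, hkeys]
    by_cases hft : f = t
    · subst hft
      have : f ∉ rest := htr
      simp [this]
    · simp [hft, List.mem_cons]

-- B's outer loop over data
lemma pvOuter (data : List (List (String × List Int))) (d : PySem.Dict Int Int) :
    (data.foldl (fun result e =>
        (PySem.Set.ofList (pvTaskOf e)).foldl (fun r t =>
            if r.contains t then r.modify t 0 (· + 1) else r) result) d).keys = d.keys ∧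
    ∀ f, f ∈ d.keys →
      (data.foldl (fun result e =>
          (PySem.Set.ofList (pvTaskOf e)).foldl (fun r t =>
              if r.contains t then r.modify t 0 (· + 1) else r) result) d).getD f 0 =
        d.getD f 0 + pvCnt f data := by
  induction data generalizing d with
  | nil => simp [pvCnt]
  | cons e rest ih =>
    simp only [List.foldl_cons]
    obtain ⟨hk1, hg1⟩ := pvInner (PySem.Set.ofList (pvTaskOf e)) (PySem.Set.nodup_ofList _) d
    obtain ⟨hk2, hg2⟩ := ih _
    refine ⟨by rw [hk2, hk1], ?_⟩
    intro f hf
    rw [hg2 f (by rw [hk1]; exact hf), hg1 f]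
    have hmem : (f ∈ PySem.Set.ofList (pvTaskOf e)) ↔ f ∈ pvTaskOf e := PySem.Set.mem_ofList _ _
    simp only [pvCnt, List.foldr_cons]
    by_cases hin : f ∈ pvTaskOf e
    · simp only [hmem, hin, hf, and_self, if_pos]
      ring
    · simp only [hmem, hin, false_and, if_false]
      ring

lemma pvFields_nodup : pvFields.Nodup := by decide

-- A's result in closed form
lemma recruit_count_eq (data : List (List (String × List Int))) :
    recruit_count data = pvFields.map (fun f => (f, pvCnt f data)) := by
  unfold recruit_count
  have h := PySem.Dict.items_foldl_insert_fresh (l := pvFields) (k := fun f => f)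
      (v := fun f => data.foldl (fun count e => if f ∈ pvTaskOf e then count + 1 else count) (0 : Int))
      (d := PySem.Dict.empty)
      (by intro a _; simp [PySem.Dict.contains_empty]) (by simpa using pvFields_nodup)
  rw [h]
  simp only [PySem.Dict.empty, List.nil_append]
  exact List.map_congr_left (fun f _ => by rw [pvCnt_foldl]; simp)

-- B's initial table
lemma pvInit_items :
    (pvFields.foldl (fun r f => r.insert f (0 : Int)) PySem.Dict.empty).items =
      pvFields.map (fun f => (f, (0 : Int))) := by
  have h := PySem.Dict.items_foldl_insert_fresh (l := pvFields) (k := fun f => f)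
      (v := fun _ => (0 : Int)) (d := PySem.Dict.empty)
      (by intro a _; simp [PySem.Dict.contains_empty]) (by simpa using pvFields_nodup)
  rw [h]; simp [PySem.Dict.empty]

lemma recruit_count_alt_eq (data : List (List (String × List Int))) :
    recruit_count_alt data = pvFields.map (fun f => (f, pvCnt f data)) := by
  unfold recruit_count_alt
  set d0 := pvFields.foldl (fun r f => r.insert f (0 : Int)) PySem.Dict.empty with hd0
  have hkeys0 : d0.keys = pvFields := by
    show d0.items.map Prod.fst = pvFields
    rw [pvInit_items]; simp [Function.comp_def]
  have hget0 : ∀ f ∈ pvFields, d0.getD f 0 = 0 := by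
    intro f hf
    have hmem : (f, (0 : Int)) ∈ d0.items := by
      rw [pvInit_items]; exact List.mem_map.mpr ⟨f, hf, rfl⟩
    exact PySem.Dict.getD_of_mem_items d0 hmem (by rw [hkeys0]; exact pvFields_nodup) 0
  obtain ⟨hk, hg⟩ := pvOuter data d0
  set dfin := data.foldl (fun result e =>
      (PySem.Set.ofList (pvTaskOf e)).foldl (fun r t =>
          if r.contains t then r.modify t 0 (· + 1) else r) result) d0
  have hkeys : dfin.keys = pvFields := by rw [hk, hkeys0]
  have hnd : dfin.keys.Nodup := by rw [hkeys]; exact pvFields_nodup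
  rw [PySem.Dict.items_eq_map_keys dfin hnd 0, hkeys]
  refine List.map_congr_left (fun f hf => ?_)
  rw [hg f (by rw [hkeys0]; exact hf), hget0 f hf]
  simp

-- ===== VERDICT (by name: the statement is the Claim_ definition above) =====
theorem recruit_count_spec : Claim_equal_recruit_count := by
  intro data _ _
  show recruit_count data = recruit_count_alt data
  rw [recruit_count_eq, recruit_count_alt_eq]
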